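-- pv_equiv track=rewrite | github.com/QubitPi/huggingface-doc-builder | src/doc_builder/convert_rst_to_mdx.py | split_pt_tf_code_blocks
-- ===== SOURCE A (Python) =====
-- def split_pt_tf_code_blocks(text):
--     """
--     Split PyTorch and TensorFlow specific block codes.
--     """
--     lines = text.split("\n")
--     new_lines = []
--     idx = 0
--     while idx < len(lines):
--         if lines[idx].startswith("```"):
--             code_lines = {"common": [lines[idx]], "pytorch": [], "tensorflow": []}
--             is_pytorch = False
--             is_tensorflow = False
--             idx += 1
--             while idx < len(lines) and lines[idx].strip() != "```":
--                 if "## PYTORCH CODE" in lines[idx]: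
--                     is_pytorch = True
--                     is_tensorflow = False
--                 elif "## TENSORFLOW CODE" in lines[idx]:
--                     is_tensorflow = True
--                     is_pytorch = False
--                 elif is_pytorch:
--                     code_lines["pytorch"].append(lines[idx])
--                 elif is_tensorflow:
--                     code_lines["tensorflow"].append(lines[idx])
--                 else:
--                     code_lines["common"].append(lines[idx])
--                 idx += 1
--             if len(code_lines["pytorch"]) > 0 or len(code_lines["tensorflow"]) > 0:
--                 block_lines = ["{#if fw === 'pt'}"] + code_lines["common"].copy() + code_lines["pytorch"] + ["```"]
--                 block_lines += ["{:else}"] + code_lines["common"].copy() + code_lines["tensorflow"] + ["```", "{/if}"]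
--                 new_lines.extend(block_lines)
--             else:
--                 block_lines = code_lines["common"] + ["```"]
--                 new_lines.extend(block_lines)
--             idx += 1
--         else:
--             new_lines.append(lines[idx])
--             idx += 1
--     return "\n".join(new_lines)
-- ===== SOURCE B (Python) =====
-- def _is_marker(line):
--     return "## PYTORCH CODE" in line or "## TENSORFLOW CODE" in line
--
--
-- def _split_at_marker(body):
--     for k, line in enumerate(body):
--         if _is_marker(line):
--             return body[:k], body[k:]
--     return body[:], []
--
--
-- def _buckets(rest):
--     pt, tf = [], []
--     while rest:
--         marker, after = rest[0], rest[1:]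
--         chunk, rest = _split_at_marker(after)
--         if "## PYTORCH CODE" in marker:
--             pt += chunk
--         else:
--             tf += chunk
--     return pt, tf
--
--
-- def _render(seg):
--     if seg[0] == "plain":
--         return [seg[1]]
--     fence, body = seg[1], seg[2]
--     common_tail, marked = _split_at_marker(body)
--     pt, tf = _buckets(marked)
--     common = [fence] + common_tail
--     if pt or tf:
--         return (["{#if fw === 'pt'}"] + common + pt + ["```", "{:else}"]
--                 + common + tf + ["```", "{/if}"])
--     return common + ["```"]
--
--
-- def split_pt_tf_code_blocks(text):
--     lines = text.split("\n")
--     # pass 1: group the lines into plain lines and fenced code blocks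
--     segments = []
--     i, n = 0, len(lines)
--     while i < n:
--         if lines[i].startswith("```"):
--             j = i + 1
--             while j < n and lines[j].strip() != "```":
--                 j += 1
--             segments.append(("block", lines[i], lines[i + 1 : j]))
--             i = j + 1
--         else:
--             segments.append(("plain", lines[i]))
--             i += 1
--     # pass 2: render each segment, partitioning block bodies at the marker lines
--     out = []
--     for seg in segments:
--         out += _render(seg)
--     return "\n".join(out)
-- ===== Notes on version B (the rewrite author's own statement) =====
-- stated objective: alternative
-- what changed: Replaces A's single index-driven state machine (per-line is_pytorch/is_tensorflow flags inside one while loop) by two passes: first group the lines into plain/fenced-block segments, then partition each block body by slicing it at the marker lines into a common prefix and per-marker chunks.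
import Mathlib
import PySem

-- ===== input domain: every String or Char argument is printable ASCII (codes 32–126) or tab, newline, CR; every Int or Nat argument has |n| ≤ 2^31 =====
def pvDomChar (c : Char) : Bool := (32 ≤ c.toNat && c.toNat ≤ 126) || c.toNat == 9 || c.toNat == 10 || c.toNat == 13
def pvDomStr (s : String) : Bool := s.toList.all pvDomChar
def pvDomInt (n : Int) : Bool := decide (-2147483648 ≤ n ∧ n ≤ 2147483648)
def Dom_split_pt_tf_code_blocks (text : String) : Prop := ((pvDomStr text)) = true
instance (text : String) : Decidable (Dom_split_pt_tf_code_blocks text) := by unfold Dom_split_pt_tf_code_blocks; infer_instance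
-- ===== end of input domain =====

-- B re-groups the lines into segments first and then slices each block body at the marker
-- lines, instead of A's one index-driven state machine; alternative decomposition, same cost.

-- ===== PORT A =====
-- A's inner while loop: carries the dict {"common","pytorch","tensorflow"} and the two flags,
-- returns the three buckets plus the lines after the closing fence.
def pvAInner : List String → List String → List String → List String → Bool → Bool →
    List String × List String × List String × List String
  | [], common, pt, tf, _, _ => (common, pt, tf, [])
  | x :: xs, common, pt, tf, isPt, isTf =>
    if PySem.Str.strip x == "```" then (common, pt, tf, xs)
    else if PySem.Str.isIn "## PYTORCH CODE" x then pvAInner xs common pt tf true false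
    else if PySem.Str.isIn "## TENSORFLOW CODE" x then pvAInner xs common pt tf false true
    else if isPt then pvAInner xs common (pt ++ [x]) tf isPt isTf
    else if isTf then pvAInner xs common pt (tf ++ [x]) isPt isTf
    else pvAInner xs (common ++ [x]) pt tf isPt isTf

theorem pvAInner_rest_le (ls common pt tf : List String) (b1 b2 : Bool) :
    (pvAInner ls common pt tf b1 b2).2.2.2.length ≤ ls.length := by
  induction ls generalizing common pt tf b1 b2 with
  | nil => simp [pvAInner]
  | cons x xs ih =>
    simp only [pvAInner]
    split_ifs <;> simp <;> exact le_trans (ih ..) (Nat.le_succ _)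

-- A's outer while loop over the lines.
def pvAOuter : List String → List String
  | [] => []
  | l :: rest =>
    if PySem.Str.startswith l "```" then
      let r := pvAInner rest [l] [] [] false false
      (if 0 < r.2.1.length || 0 < r.2.2.1.length then
        ["{#if fw === 'pt'}"] ++ r.1 ++ r.2.1 ++ ["```"] ++
          ["{:else}"] ++ r.1 ++ r.2.2.1 ++ ["```", "{/if}"]
      else r.1 ++ ["```"]) ++ pvAOuter r.2.2.2
    else l :: pvAOuter rest
termination_by ls => ls.length
decreasing_by
  · exact Nat.lt_succ_of_le (pvAInner_rest_le ..)
  · simp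

def split_pt_tf_code_blocks (text : String) : String :=
  -- text.split("\n"): the separator is non-empty, so split? is always `some`
  PySem.Str.join "\n" (pvAOuter ((PySem.Str.split? text "\n").getD []))

-- ===== PORT B =====
inductive PvSeg : Type
  | plain : String → PvSeg
  | block : String → List String → PvSeg

def pvIsMarker (line : String) : Bool :=
  PySem.Str.isIn "## PYTORCH CODE" line || PySem.Str.isIn "## TENSORFLOW CODE" line

-- Source B _split_at_marker: (lines before the first marker, lines from the first marker on)
def pvSplitAtMarker : List String → List String × List String
  | [] => ([], [])
  | x :: xs =>
    if pvIsMarker x then ([], x :: xs)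
    else
      let r := pvSplitAtMarker xs
      (x :: r.1, r.2)

theorem pvSplitAtMarker_rest_le (ls : List String) :
    (pvSplitAtMarker ls).2.length ≤ ls.length := by
  induction ls with
  | nil => simp [pvSplitAtMarker]
  | cons x xs ih =>
    simp only [pvSplitAtMarker]
    split_ifs <;> simp
    exact le_trans ih (Nat.le_succ _)

-- Source B _buckets: the chunk after each marker line goes to that marker's bucket.
def pvBuckets : List String → List String × List String
  | [] => ([], [])
  | m :: xs =>
    let s := pvSplitAtMarker xs
    let r := pvBuckets s.2
    if PySem.Str.isIn "## PYTORCH CODE" m then (s.1 ++ r.1, r.2) else (r.1, s.1 ++ r.2)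
termination_by ls => ls.length
decreasing_by
  exact Nat.lt_succ_of_le (pvSplitAtMarker_rest_le ..)

-- pass 1 inner scan: the block body (up to the closing fence) and the lines after it
def pvSplitBody : List String → List String × List String
  | [] => ([], [])
  | x :: xs =>
    if PySem.Str.strip x == "```" then ([], xs)
    else
      let r := pvSplitBody xs
      (x :: r.1, r.2)

theorem pvSplitBody_rest_le (ls : List String) :
    (pvSplitBody ls).2.length ≤ ls.length := by
  induction ls with
  | nil => simp [pvSplitBody]
  | cons x xs ih =>
    simp only [pvSplitBody]
    split_ifs <;> simp
    exact le_trans ih (Nat.le_succ _)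

-- Source B pass 1: group the lines into segments
def pvSegs : List String → List PvSeg
  | [] => []
  | l :: rest =>
    if PySem.Str.startswith l "```" then
      let r := pvSplitBody rest
      PvSeg.block l r.1 :: pvSegs r.2
    else PvSeg.plain l :: pvSegs rest
termination_by ls => ls.length
decreasing_by
  · exact Nat.lt_succ_of_le (pvSplitBody_rest_le ..)
  · simp

-- Source B _render
def pvRender : PvSeg → List String
  | PvSeg.plain l => [l]
  | PvSeg.block fence body =>
    let s := pvSplitAtMarker body
    let b := pvBuckets s.2
    let common := fence :: s.1
    if 0 < b.1.length || 0 < b.2.length then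
      ["{#if fw === 'pt'}"] ++ common ++ b.1 ++ ["```", "{:else}"] ++
        common ++ b.2 ++ ["```", "{/if}"]
    else common ++ ["```"]

def split_pt_tf_code_blocks_alt (text : String) : String :=
  PySem.Str.join "\n"
    -- text.split("\n"): the separator is non-empty, so split? is always `some`
    (((pvSegs ((PySem.Str.split? text "\n").getD []))).foldl (fun out seg => out ++ pvRender seg) [])

-- ===== PRECONDITION & SPEC =====
def Spec_split_pt_tf_code_blocks (text : String) (out : String) : Prop := out = split_pt_tf_code_blocks_alt text
instance (text : String) (out : String) : Decidable (Spec_split_pt_tf_code_blocks text out) := by unfold Spec_split_pt_tf_code_blocks; infer_instance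

-- ===== CLAIM (what is proved, stated in full; the proofs are below) =====
def Claim_equal_split_pt_tf_code_blocks : Prop := ∀ (text : String), Dom_split_pt_tf_code_blocks text → Spec_split_pt_tf_code_blocks text (split_pt_tf_code_blocks text)

-- ===== LEMMAS AND PROOFS =====

-- A's inner state machine computes exactly B's slice-based partition, in each of the three
-- reachable flag states.
theorem pvAInner_eq (ls : List String) : ∀ (c p t : List String),
    (pvAInner ls c p t false false =
      (c ++ (pvSplitAtMarker (pvSplitBody ls).1).1,
       p ++ (pvBuckets (pvSplitAtMarker (pvSplitBody ls).1).2).1,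
       t ++ (pvBuckets (pvSplitAtMarker (pvSplitBody ls).1).2).2,
       (pvSplitBody ls).2)) ∧
    (pvAInner ls c p t true false =
      (c,
       p ++ (pvSplitAtMarker (pvSplitBody ls).1).1 ++ (pvBuckets (pvSplitAtMarker (pvSplitBody ls).1).2).1,
       t ++ (pvBuckets (pvSplitAtMarker (pvSplitBody ls).1).2).2,
       (pvSplitBody ls).2)) ∧
    (pvAInner ls c p t false true =
      (c,
       p ++ (pvBuckets (pvSplitAtMarker (pvSplitBody ls).1).2).1,
       t ++ (pvSplitAtMarker (pvSplitBody ls).1).1 ++ (pvBuckets (pvSplitAtMarker (pvSplitBody ls).1).2).2,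
       (pvSplitBody ls).2)) := by
  induction ls with
  | nil => intro c p t; simp [pvAInner, pvSplitBody, pvSplitAtMarker, pvBuckets]
  | cons x xs ih =>
    intro c p t
    by_cases hf : PySem.Str.strip x == "```"
    · simp [pvAInner, pvSplitBody, hf, pvSplitAtMarker, pvBuckets]
    · by_cases hp : PySem.Str.isIn "## PYTORCH CODE" x
      · have hp' := hp; simp at hp'
        simp [pvAInner, pvSplitBody, hf, hp', pvSplitAtMarker, pvBuckets, pvIsMarker,
          (ih c p t).2.1, List.append_assoc]
      · by_cases ht : PySem.Str.isIn "## TENSORFLOW CODE" x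
        · have hp' := hp; simp at hp'
          have ht' := ht; simp at ht'
          simp [pvAInner, pvSplitBody, hf, hp', ht', pvSplitAtMarker, pvBuckets, pvIsMarker,
            (ih c p t).2.2, List.append_assoc]
        · have hp' := hp; simp at hp'
          have ht' := ht; simp at ht'
          refine ⟨?_, ?_, ?_⟩
          · simpa [pvAInner, pvSplitBody, hf, hp', ht', pvSplitAtMarker, pvIsMarker,
              List.append_assoc] using ((ih (c ++ [x]) p t).1)
          · simpa [pvAInner, pvSplitBody, hf, hp', ht', pvSplitAtMarker, pvIsMarker,
              List.append_assoc] using ((ih c (p ++ [x]) t).2.1)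
          · simpa [pvAInner, pvSplitBody, hf, hp', ht', pvSplitAtMarker, pvIsMarker,
              List.append_assoc] using ((ih c p (t ++ [x])).2.2)

theorem pvAOuter_eq (ls : List String) : pvAOuter ls = (pvSegs ls).flatMap pvRender := by
  induction hn : ls.length using Nat.strong_induction_on generalizing ls with
  | _ n ih =>
    match ls with
    | [] => simp [pvAOuter, pvSegs]
    | l :: rest =>
      by_cases hs : PySem.Str.startswith l "```"
      · have h1 := (pvAInner_eq rest [l] [] []).1
        have hlen : (pvSplitBody rest).2.length < n := by
          have := pvSplitBody_rest_le rest
          simp at hn; omega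
        simp only [pvAOuter, pvSegs, hs, if_pos, h1, List.flatMap_cons]
        rw [ih _ hlen _ rfl]
        simp [pvRender, List.append_assoc]
      · simp only [pvAOuter, pvSegs, hs]
        rw [ih (rest.length) (by simp at hn; omega) rest rfl]
        simp [pvRender]

-- ===== VERDICT (by name: the statement is the Claim_ definition above) =====
theorem split_pt_tf_code_blocks_spec : Claim_equal_split_pt_tf_code_blocks := by
  intro text _
  unfold Spec_split_pt_tf_code_blocks split_pt_tf_code_blocks split_pt_tf_code_blocks_alt
  rw [pvAOuter_eq, PySem.List.foldl_append_eq_flatMap]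
  simp
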